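-- pv_equiv track=rewrite | github.com/mehtaayush859/secu-scanner | cli_tool/web_scan.py | check_information_disclosure
-- ===== SOURCE A (Python) =====
-- from typing import Dict, Any, List
--
-- def check_information_disclosure(headers: Dict[str, str]) -> List[Dict[str, Any]]:
--     """Check for information disclosure in headers."""
--     issues = []
--
--     # Check for server information
--     if "Server" in headers:
--         issues.append({
--             "type": "server_info",
--             "header": "Server",
--             "value": headers["Server"],
--             "description": "Server information exposed"
--         })
--
--     # Check for powered-by headers
--     for header, value in headers.items():
--         if "powered-by" in header.lower() or "x-powered-by" in header.lower():
--             issues.append({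
--                 "type": "framework_info",
--                 "header": header,
--                 "value": value,
--                 "description": "Framework/technology information exposed"
--             })
--
--     # Check for version information
--     for header, value in headers.items():
--         if any(keyword in header.lower() for keyword in ["version", "build", "release"]):
--             issues.append({
--                 "type": "version_info",
--                 "header": header,
--                 "value": value,
--                 "description": "Version information exposed"
--             })
--
--     return issues
-- ===== SOURCE B (Python) =====
-- def check_information_disclosure(headers):
--     """Check for information disclosure in headers (single pass, three buckets)."""
--     server_issues = []
--     framework_issues = []
--     version_issues = []
--     for header, value in headers.items():
--         if header == "Server":
--             server_issues.append({
--                 "type": "server_info",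
--                 "header": "Server",
--                 "value": value,
--                 "description": "Server information exposed"
--             })
--         if "powered-by" in header.lower():
--             framework_issues.append({
--                 "type": "framework_info",
--                 "header": header,
--                 "value": value,
--                 "description": "Framework/technology information exposed"
--             })
--         if any(k in header.lower() for k in ("version", "build", "release")):
--             version_issues.append({
--                 "type": "version_info",
--                 "header": header,
--                 "value": value,
--                 "description": "Version information exposed"
--             })
--     return server_issues + framework_issues + version_issues
-- ===== Notes on version B (the rewrite author's own statement) =====
-- stated objective: alternative
-- what changed: One pass over headers.items() routing each header into three accumulator lists (server / powered-by / version), concatenated at the end, instead of a membership-plus-lookup check followed by two separate scans; the redundant 'x-powered-by' test (subsumed by 'powered-by') is dropped.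
import Mathlib
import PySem

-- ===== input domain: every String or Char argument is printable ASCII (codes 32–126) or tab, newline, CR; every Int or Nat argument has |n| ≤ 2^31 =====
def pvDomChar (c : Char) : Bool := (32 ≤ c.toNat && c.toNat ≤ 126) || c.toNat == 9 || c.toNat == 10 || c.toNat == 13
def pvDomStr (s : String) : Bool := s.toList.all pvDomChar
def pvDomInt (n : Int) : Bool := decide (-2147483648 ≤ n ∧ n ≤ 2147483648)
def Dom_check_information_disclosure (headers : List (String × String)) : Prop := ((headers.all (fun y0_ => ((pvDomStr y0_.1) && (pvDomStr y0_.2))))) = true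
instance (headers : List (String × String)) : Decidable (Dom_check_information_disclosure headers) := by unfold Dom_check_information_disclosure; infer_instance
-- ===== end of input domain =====

-- B replaces A's membership-plus-lookup check and two further scans by ONE pass that routes each
-- header into three accumulator lists (server / powered-by / version), concatenated at the end
-- (objective: alternative decomposition, same cost).

-- ===== PORT A =====
-- the four-key dicts A appends, as insertion-ordered association lists
def pvIssueServer (v : String) : List (String × String) :=
  [("type", "server_info"), ("header", "Server"), ("value", v),
   ("description", "Server information exposed")]
def pvIssueFw (h v : String) : List (String × String) :=
  [("type", "framework_info"), ("header", h), ("value", v),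
   ("description", "Framework/technology information exposed")]
def pvIssueVer (h v : String) : List (String × String) :=
  [("type", "version_info"), ("header", h), ("value", v),
   ("description", "Version information exposed")]

def check_information_disclosure (headers : List (String × String)) : List (List (String × String)) :=
  -- 'if "Server" in headers: issues.append({... headers["Server"] ...})' (dict lookup = first match)
  let issues : List (List (String × String)) :=
    match headers.find? (fun p => p.1 == "Server") with
    | some p => [pvIssueServer p.2]
    | none   => []
  -- first loop over headers.items(): powered-by
  let issues := headers.foldl (fun acc p =>
    if PySem.Str.isIn "powered-by" (PySem.Str.lower p.1)
        || PySem.Str.isIn "x-powered-by" (PySem.Str.lower p.1)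
    then acc ++ [pvIssueFw p.1 p.2] else acc) issues
  -- second loop over headers.items(): version keywords
  let issues := headers.foldl (fun acc p =>
    if PySem.Str.isIn "version" (PySem.Str.lower p.1)
        || PySem.Str.isIn "build" (PySem.Str.lower p.1)
        || PySem.Str.isIn "release" (PySem.Str.lower p.1)
    then acc ++ [pvIssueVer p.1 p.2] else acc) issues
  issues

-- ===== PORT B =====
def check_information_disclosure_alt (headers : List (String × String)) : List (List (String × String)) :=
  let r := headers.foldl
    (fun (acc : List (List (String × String)) × List (List (String × String)) × List (List (String × String))) p =>
      ((if p.1 == "Server" then acc.1 ++ [pvIssueServer p.2] else acc.1),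
       (if PySem.Str.isIn "powered-by" (PySem.Str.lower p.1)
        then acc.2.1 ++ [pvIssueFw p.1 p.2] else acc.2.1),
       (if PySem.Str.isIn "version" (PySem.Str.lower p.1)
            || PySem.Str.isIn "build" (PySem.Str.lower p.1)
            || PySem.Str.isIn "release" (PySem.Str.lower p.1)
        then acc.2.2 ++ [pvIssueVer p.1 p.2] else acc.2.2)))
    ([], [], [])
  r.1 ++ r.2.1 ++ r.2.2

-- ===== PRECONDITION & SPEC =====
-- Pre_ restricts the association list to genuine Python-dict representations (pairwise-distinct
-- keys): a Python dict never holds duplicate keys, so A is never called on such a list; on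
-- duplicate-'Server' lists the two ports would disagree (A emits the first value once, B one per occurrence).
def Pre_check_information_disclosure (headers : List (String × String)) : Prop :=
  (headers.map Prod.fst).Nodup
instance (headers : List (String × String)) : Decidable (Pre_check_information_disclosure headers) := by
  unfold Pre_check_information_disclosure; infer_instance

def pvWitness_check_information_disclosure : (List (String × String)) :=
  [("Server", "nginx"), ("X-Powered-By", "PHP"), ("Content-Type", "text/html")]

def Spec_check_information_disclosure (headers : List (String × String)) (out : List (List (String × String))) : Prop := out = check_information_disclosure_alt headers
instance (headers : List (String × String)) (out : List (List (String × String))) : Decidable (Spec_check_information_disclosure headers out) := by unfold Spec_check_information_disclosure; infer_instance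

-- ===== CLAIM (what is proved, stated in full; the proofs are below) =====
def Claim_equal_check_information_disclosure : Prop := ∀ (headers : List (String × String)), Dom_check_information_disclosure headers → Pre_check_information_disclosure headers → Spec_check_information_disclosure headers (check_information_disclosure headers)

-- ===== LEMMAS AND PROOFS =====

-- "x-powered-by" contains "powered-by", so A's second disjunct is redundant
theorem pv_fw_or (s : String) :
    (PySem.Str.isIn "powered-by" s || PySem.Str.isIn "x-powered-by" s)
      = PySem.Str.isIn "powered-by" s := by
  cases h : PySem.Str.isIn "powered-by" s with
  | true => simp
  | false =>
    have h' : PySem.Chars.isIn ['p','o','w','e','r','e','d','-','b','y'] s.toList = false := by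
      simpa using h
    have hnot : ¬ (['p','o','w','e','r','e','d','-','b','y'] <:+: s.toList) :=
      (PySem.Chars.isIn_eq_false_iff _ _).mp h'
    have hx : PySem.Chars.isIn ['x','-','p','o','w','e','r','e','d','-','b','y'] s.toList = false :=
      (PySem.Chars.isIn_eq_false_iff _ _).mpr (fun hinf => hnot (List.IsInfix.trans (by decide) hinf))
    simp [hx]

-- with pairwise-distinct keys, the filtered 'Server' entries are exactly the first (only) match
theorem pv_filter_server (headers : List (String × String))
    (hnd : (headers.map Prod.fst).Nodup) :
    headers.filter (fun p => p.1 == "Server")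
      = (headers.find? (fun p => p.1 == "Server")).toList := by
  induction headers with
  | nil => simp
  | cons p t ih =>
    simp only [List.map_cons, List.nodup_cons] at hnd
    by_cases hp : p.1 == "Server"
    · have hs : p.1 = "Server" := by simpa using hp
      have ht : t.filter (fun q => q.1 == "Server") = [] := by
        rw [List.filter_eq_nil_iff]
        intro q hq hqS
        exact hnd.1 (by rw [hs, ← show q.1 = "Server" by simpa using hqS]; exact List.mem_map_of_mem hq)
      simp [hp, ht]
    · simp only [List.filter_cons, List.find?_cons, hp]
      simpa using ih hnd.2

-- B's one-pass fold computes the three buckets independently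
theorem pv_fold_split (headers : List (String × String))
    (s0 f0 v0 : List (List (String × String))) :
    headers.foldl
      (fun (acc : List (List (String × String)) × List (List (String × String)) × List (List (String × String))) p =>
        ((if p.1 == "Server" then acc.1 ++ [pvIssueServer p.2] else acc.1),
         (if PySem.Str.isIn "powered-by" (PySem.Str.lower p.1)
          then acc.2.1 ++ [pvIssueFw p.1 p.2] else acc.2.1),
         (if PySem.Str.isIn "version" (PySem.Str.lower p.1)
              || PySem.Str.isIn "build" (PySem.Str.lower p.1)
              || PySem.Str.isIn "release" (PySem.Str.lower p.1)
          then acc.2.2 ++ [pvIssueVer p.1 p.2] else acc.2.2)))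
      (s0, f0, v0)
    = (s0 ++ (headers.filter (fun p => p.1 == "Server")).map (fun p => pvIssueServer p.2),
       f0 ++ (headers.filter (fun p => PySem.Str.isIn "powered-by" (PySem.Str.lower p.1))).map
               (fun p => pvIssueFw p.1 p.2),
       v0 ++ (headers.filter (fun p => PySem.Str.isIn "version" (PySem.Str.lower p.1)
              || PySem.Str.isIn "build" (PySem.Str.lower p.1)
              || PySem.Str.isIn "release" (PySem.Str.lower p.1))).map
               (fun p => pvIssueVer p.1 p.2)) := by
  induction headers generalizing s0 f0 v0 with
  | nil => simp
  | cons p t ih =>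
    simp only [List.foldl_cons, ih, List.filter_cons]
    split_ifs <;> simp_all

-- ===== VERDICT (by name: the statement is the Claim_ definition above) =====
theorem check_information_disclosure_spec : Claim_equal_check_information_disclosure := by
  intro headers _ hpre
  unfold Spec_check_information_disclosure
  simp only [check_information_disclosure, check_information_disclosure_alt]
  rw [pv_fold_split]
  rw [PySem.List.foldl_append_if, PySem.List.foldl_append_if]
  have hfw : (fun p : String × String =>
      PySem.Str.isIn "powered-by" (PySem.Str.lower p.1)
        || PySem.Str.isIn "x-powered-by" (PySem.Str.lower p.1))
      = (fun p : String × String => PySem.Str.isIn "powered-by" (PySem.Str.lower p.1)) := by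
    funext p; exact pv_fw_or _
  rw [hfw, pv_filter_server headers hpre]
  cases headers.find? (fun p => p.1 == "Server") <;> simp
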